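-- pv_equiv track=rewrite | github.com/JFan5/Safety-gen | pddl3/blocksworld/convert_pddl3_1.py | heuristic_unique_solution
-- ===== SOURCE A (Python) =====
-- from typing import List, Tuple, Dict, Optional, Any, Set
--
-- Action = Tuple[str, Tuple[str, ...]]
--
-- Literal = Tuple[str, Tuple[str, ...]]
--
-- Event = Tuple[int, Literal]  # (step_index, literal_made_true)
--
-- def heuristic_unique_solution(plan: List[Action], events: List[Event], goals: List[Literal]) -> bool:
--     """
--     启发式判定“高度唯一”：
--     1) 没有任何 (on a b) 被多次建立（无重复叠放）
--     2) 没有把不在 goal 的方块多次落桌（减少绕路）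
--     3) 所有 goal 的首次达成时刻严格靠近尾部（最后连续完成）
--     """
--     if not plan:
--         return False
--     # 1) (on a b) 不重复
--     on_counts: Dict[Tuple[str, str], int] = {}
--     for _, (pred, args) in events:
--         if pred == "on":
--             on_counts[args] = on_counts.get(args, 0) + 1
--     if any(c > 1 for c in on_counts.values()):
--         return False
--
--     # 2) 对不在 goal 的 X，(on-table X) 多次出现视为绕路
--     goal_ontable = {(args[0],) for (pred, args) in goals if pred == "on-table" and len(args) == 1}
--     on_table_counts: Dict[Tuple[str], int] = {}
--     for _, (pred, args) in events:
--         if pred == "on-table":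
--             on_table_counts[args] = on_table_counts.get(args, 0) + 1
--     for x, c in on_table_counts.items():
--         if x not in goal_ontable and c > 1:
--             return False
--
--     # 3) 目标集中在后段成立（留少量缓冲）
--     last_k = max(1, len(goals) // 2)
--     # 收集每个 goal 首次达成的 step（没有达成则用一个很大值）
--     g2t: Dict[Literal, int] = {}
--     # 找到事件中最大 step
--     max_step = max(step for step, _ in events) if events else len(plan)
--     # 简单再跑一次以确保时间戳
--     # （也可以从 first_achievements 复用）
--     # 这里直接调用 first_achievements
--     # 但我们已有 events，改用 first_achievements 更稳
--     # -> 在外部已计算，调用者可传入；为简洁这里再算一次略微冗余。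
--     # （实际集成时可传入 achieved 映射避免重复）
--     return False if len(plan) < 3 else True  # 保守：计划较短时不判唯一
-- ===== SOURCE B (Python) =====
-- def _no_dup(keys):
--     # quadratic scan: peel the head, fail if it reappears in the remainder
--     while keys:
--         head, keys = keys[0], keys[1:]
--         if head in keys:
--             return False
--     return True
--
--
-- def heuristic_unique_solution(plan, events, goals):
--     # Dict-free: build the two key lists up front (goal-exempt on-table keys
--     # dropped during extraction), then duplicate-check each by membership scan.
--     if len(plan) < 3:
--         return False
--     goal_ontable = {(args[0],) for (pred, args) in goals if pred == "on-table" and len(args) == 1}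
--     on_keys = [args for _, (pred, args) in events if pred == "on"]
--     table_keys = [args for _, (pred, args) in events
--                   if pred == "on-table" and args not in goal_ontable]
--     return _no_dup(on_keys) and _no_dup(table_keys)
-- ===== Notes on version B (the rewrite author's own statement) =====
-- stated objective: simpler
-- what changed: Replaces the counting dicts with their post-hoc count>1 scans (and the dead g2t/max_step/last_k section) by two comprehension-built key lists, the goal-on-table exemption applied during extraction, each checked for a repeat by a head-vs-rest membership scan.
import Mathlib
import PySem

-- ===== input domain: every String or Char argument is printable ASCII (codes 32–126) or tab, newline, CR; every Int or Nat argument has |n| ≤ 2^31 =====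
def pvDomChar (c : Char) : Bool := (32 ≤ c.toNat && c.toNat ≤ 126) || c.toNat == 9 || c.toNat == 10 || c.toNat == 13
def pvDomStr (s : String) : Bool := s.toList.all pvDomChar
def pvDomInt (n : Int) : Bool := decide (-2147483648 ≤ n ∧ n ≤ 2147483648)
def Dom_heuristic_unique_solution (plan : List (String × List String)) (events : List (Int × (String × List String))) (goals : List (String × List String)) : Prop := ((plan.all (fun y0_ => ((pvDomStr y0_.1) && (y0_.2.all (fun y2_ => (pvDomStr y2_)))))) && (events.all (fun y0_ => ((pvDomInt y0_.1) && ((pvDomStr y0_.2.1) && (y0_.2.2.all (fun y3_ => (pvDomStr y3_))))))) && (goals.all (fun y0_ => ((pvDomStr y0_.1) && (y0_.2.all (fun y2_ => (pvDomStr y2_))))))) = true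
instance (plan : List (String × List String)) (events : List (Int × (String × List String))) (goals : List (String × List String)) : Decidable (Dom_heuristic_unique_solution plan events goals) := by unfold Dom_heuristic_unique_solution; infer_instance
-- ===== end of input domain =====

-- B drops A's counting dicts, their post-hoc count>1 scans and the dead g2t/max_step/last_k
-- section: it extracts the two key lists by comprehension (goal-exempt on-table keys removed
-- during extraction) and duplicate-checks each with a head-vs-rest membership scan (objective: simpler).

-- ===== PORT A =====
def heuristic_unique_solution (plan : List (String × List String)) (events : List (Int × (String × List String))) (goals : List (String × List String)) : Bool :=
  if plan.isEmpty then false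
  else
    -- 1) count (on a b) establishments
    let on_counts : PySem.Dict (List String) Int :=
      events.foldl (fun d e => if e.2.1 == "on" then d.insert e.2.2 (d.getD e.2.2 0 + 1) else d) PySem.Dict.empty
    if on_counts.values.any (fun c => decide (1 < c)) then false
    else
      -- 2) goal_ontable set comprehension; args[0] of a length-1 tuple ported as [g.2.headD ""]
      let goal_ontable : PySem.Set (List String) :=
        PySem.Set.ofList ((goals.filter (fun g => g.1 == "on-table" && g.2.length == 1)).map (fun g => [g.2.headD ""]))
      let on_table_counts : PySem.Dict (List String) Int :=
        events.foldl (fun d e => if e.2.1 == "on-table" then d.insert e.2.2 (d.getD e.2.2 0 + 1) else d) PySem.Dict.empty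
      if on_table_counts.items.any (fun p => !(PySem.Set.contains goal_ontable p.1) && decide (1 < p.2)) then false
      else
        -- 3) dead bindings of A, kept as discarded lets
        let _last_k : Int := max 1 (PySem.Int.floordiv (goals.length : Int) 2)
        let _max_step : Int := if events.isEmpty then (plan.length : Int) else ((events.map (·.1)).max?.getD 0)
        if plan.length < 3 then false else true

-- ===== PORT B =====
-- Source B's _no_dup: 'head, keys = keys[0], keys[1:]; if head in keys: return False' as
-- the structural recursion the while-loop performs on the list
def pvNoDup : List (List String) → Bool
  | [] => true
  | head :: keys => if keys.contains head then false else pvNoDup keys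

def heuristic_unique_solution_alt (plan : List (String × List String)) (events : List (Int × (String × List String))) (goals : List (String × List String)) : Bool :=
  if plan.length < 3 then false
  else
    let goal_ontable : PySem.Set (List String) :=
      PySem.Set.ofList ((goals.filter (fun g => g.1 == "on-table" && g.2.length == 1)).map (fun g => [g.2.headD ""]))
    let on_keys : List (List String) := (events.filter (fun e => e.2.1 == "on")).map (·.2.2)
    let table_keys : List (List String) :=
      (events.filter (fun e => e.2.1 == "on-table" && !(PySem.Set.contains goal_ontable e.2.2))).map (·.2.2)
    pvNoDup on_keys && pvNoDup table_keys

-- ===== PRECONDITION & SPEC =====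
def Spec_heuristic_unique_solution (plan : List (String × List String)) (events : List (Int × (String × List String))) (goals : List (String × List String)) (out : Bool) : Prop := out = heuristic_unique_solution_alt plan events goals
instance (plan : List (String × List String)) (events : List (Int × (String × List String))) (goals : List (String × List String)) (out : Bool) : Decidable (Spec_heuristic_unique_solution plan events goals out) := by unfold Spec_heuristic_unique_solution; infer_instance

-- ===== CLAIM (what is proved, stated in full; the proofs are below) =====
def Claim_equal_heuristic_unique_solution : Prop := ∀ (plan : List (String × List String)) (events : List (Int × (String × List String))) (goals : List (String × List String)), Dom_heuristic_unique_solution plan events goals → Spec_heuristic_unique_solution plan events goals (heuristic_unique_solution plan events goals)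

-- ===== LEMMAS AND PROOFS =====

-- the 'on' / 'on-table' key streams both programs look at
def pvKeys (p : String) (events : List (Int × (String × List String))) : List (List String) :=
  (events.filter (fun e => e.2.1 == p)).map (·.2.2)

theorem pvKeys_cons_eq (p : String) (e : Int × (String × List String)) (rest : List (Int × (String × List String))) (h : e.2.1 = p) :
    pvKeys p (e :: rest) = e.2.2 :: pvKeys p rest := by
  simp [pvKeys, h]

theorem pvKeys_cons_ne (p : String) (e : Int × (String × List String)) (rest : List (Int × (String × List String))) (h : ¬ e.2.1 = p) :
    pvKeys p (e :: rest) = pvKeys p rest := by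
  simp [pvKeys, h]

-- a conditional counting loop is the counting loop over the filtered key stream
theorem pv_foldl_count (p : String) (events : List (Int × (String × List String)))
    (d : PySem.Dict (List String) Int) :
    events.foldl (fun d e => if e.2.1 == p then d.insert e.2.2 (d.getD e.2.2 0 + 1) else d) d
      = (pvKeys p events).foldl (fun d x => d.insert x (d.getD x 0 + 1)) d := by
  induction events generalizing d with
  | nil => rfl
  | cons e rest ih =>
      by_cases h : e.2.1 = p
      · rw [pvKeys_cons_eq _ _ _ h, List.foldl_cons, List.foldl_cons, if_pos (by simp [h])]
        exact ih _
      · rw [pvKeys_cons_ne _ _ _ h, List.foldl_cons, if_neg (by simp [h])]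
        exact ih _

-- A's first scan fails exactly when some 'on' key repeats
theorem pv_any1 (ks : List (List String)) :
    (((PySem.Set.ofList ks).any fun k => decide (1 < (ks.count k : Int))) = false)
      ↔ ∀ x, ks.count x ≤ 1 := by
  rw [List.any_eq_false]
  constructor
  · intro h x
    by_cases hx : x ∈ ks
    · have := h x (by simpa [PySem.Set.mem_ofList] using hx)
      simpa using this
    · simp [List.count_eq_zero_of_not_mem hx]
  · intro h k hk
    simpa using h k

-- A's second scan fails exactly when some non-goal 'on-table' key repeats
theorem pv_any2 (gset : PySem.Set (List String)) (ks : List (List String)) :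
    ((((PySem.Set.ofList ks).map (fun k => (k, (ks.count k : Int)))).any
        (fun p => !(PySem.Set.contains gset p.1) && decide (1 < p.2))) = false)
      ↔ ∀ x, x ∉ gset → ks.count x ≤ 1 := by
  rw [List.any_map, List.any_eq_false]
  constructor
  · intro h x hx
    by_cases hm : x ∈ ks
    · have := h x (by simpa [PySem.Set.mem_ofList] using hm)
      simp [Function.comp] at this
      exact this hx
    · simp [List.count_eq_zero_of_not_mem hm]
  · intro h k hk
    by_cases hg : k ∈ gset
    · simp [Function.comp, hg]
    · simp [Function.comp, hg]
      simpa using h k hg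

-- the two scans in the shape A's port produces them
theorem pv_values_any (ks : List (List String)) :
    (((PySem.Dict.counter ks).values.any fun c => decide (1 < c)) = false)
      ↔ ∀ x, ks.count x ≤ 1 := by
  simp only [PySem.Dict.values, PySem.Dict.items_counter, List.map_map, List.any_map]
  exact pv_any1 ks

theorem pv_items_any (gset : PySem.Set (List String)) (ks : List (List String)) :
    (((PySem.Dict.counter ks).items.any fun p => !(PySem.Set.contains gset p.1) && decide (1 < p.2)) = false)
      ↔ ∀ x, x ∉ gset → ks.count x ≤ 1 := by
  rw [PySem.Dict.items_counter]
  exact pv_any2 gset ks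

-- B's membership scan succeeds exactly when no key occurs twice
theorem pv_noDup_iff (ks : List (List String)) :
    pvNoDup ks = true ↔ ∀ x, ks.count x ≤ 1 := by
  induction ks with
  | nil => simp [pvNoDup]
  | cons k rest ih =>
      by_cases hm : k ∈ rest
      · simp only [pvNoDup, List.contains_eq_mem, hm, decide_true, if_true]
        constructor
        · intro h; exact absurd h (by simp)
        · intro h
          have := h k
          have hc : 1 ≤ rest.count k := List.one_le_count_iff.mpr hm
          simp [List.count_cons_self] at this
          omega
      · simp only [pvNoDup, List.contains_eq_mem, hm, decide_false, Bool.false_eq_true, if_false]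
        rw [ih]
        constructor <;> intro h x <;> have hx := h x <;> by_cases hxk : x = k
        · subst hxk
          simp [List.count_eq_zero_of_not_mem hm]
        · simp [hxk, Ne.symm hxk] at *; omega
        · subst hxk
          simp [List.count_eq_zero_of_not_mem hm]
        · simp [hxk, Ne.symm hxk] at *; omega

-- contains is the decidable membership test
theorem pv_contains_decide (s : PySem.Set (List String)) (x : List String) :
    PySem.Set.contains s x = decide (x ∈ s) := by
  cases hcv : PySem.Set.contains s x
  · have h : x ∉ s := by simpa using hcv
    simp [h]
  · have h : x ∈ s := by simpa using hcv
    simp [h]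

-- B's filtered table-key list is the 'on-table' stream with goal-exempt keys removed
theorem pv_table_keys (gset : PySem.Set (List String)) (events : List (Int × (String × List String))) :
    (events.filter (fun e => e.2.1 == "on-table" && !(PySem.Set.contains gset e.2.2))).map (·.2.2)
      = (pvKeys "on-table" events).filter (fun k => !(PySem.Set.contains gset k)) := by
  induction events with
  | nil => rfl
  | cons e rest ih =>
      by_cases h : e.2.1 = "on-table"
      · rw [pvKeys_cons_eq _ _ _ h]
        have hpe : (e.2.1 == "on-table" && !PySem.Set.contains gset e.2.2)
            = !PySem.Set.contains gset e.2.2 := by simp [h]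
        rw [List.filter_cons, List.filter_cons, hpe]
        cases hgc : PySem.Set.contains gset e.2.2
        · simp only [Bool.not_false, if_true, List.map_cons, ih]
        · simp only [Bool.not_true, Bool.false_eq_true, if_false, ih]
      · rw [pvKeys_cons_ne _ _ _ h]
        have hpe : (e.2.1 == "on-table" && !PySem.Set.contains gset e.2.2) = false := by simp [h]
        rw [List.filter_cons, hpe]
        simp only [Bool.false_eq_true, if_false, ih]

-- B's on-key list is the 'on' stream
theorem pv_on_keys (events : List (Int × (String × List String))) :
    (events.filter (fun e => e.2.1 == "on")).map (·.2.2) = pvKeys "on" events := rfl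

-- count inside the filtered list
theorem pv_count_filter (gset : PySem.Set (List String)) (ks : List (List String)) (x : List String) :
    ((ks.filter (fun k => !(PySem.Set.contains gset k))).count x)
      = if x ∈ gset then 0 else ks.count x := by
  by_cases hx : x ∈ gset
  · rw [if_pos hx]
    apply List.count_eq_zero_of_not_mem
    intro hmem
    have := List.of_mem_filter hmem
    rw [pv_contains_decide] at this
    simp [hx] at this
  · rw [if_neg hx, List.count_filter (by rw [pv_contains_decide]; simp [hx])]

-- ===== VERDICT (by name: the statement is the Claim_ definition above) =====
theorem heuristic_unique_solution_spec : Claim_equal_heuristic_unique_solution := by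
  unfold Claim_equal_heuristic_unique_solution Spec_heuristic_unique_solution
  intro plan events goals _dom
  unfold heuristic_unique_solution heuristic_unique_solution_alt
  set g : PySem.Set (List String) := PySem.Set.ofList
    ((goals.filter (fun g => g.1 == "on-table" && g.2.length == 1)).map (fun g => [g.2.headD ""])) with hg
  simp only [pv_foldl_count, PySem.Dict.foldl_insert_getD_add_one_eq_counter, pv_table_keys, pv_on_keys]
  by_cases hsmall : plan.length < 3
  · have hA : ∀ b1 b2 : Bool,
        (if plan.isEmpty then false else if b1 then false else if b2 then false
         else if plan.length < 3 then false else true) = false := by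
      intro b1 b2
      cases plan.isEmpty <;> cases b1 <;> cases b2 <;> simp [hsmall]
    rw [hA, if_pos hsmall]
  · have hpe : plan.isEmpty = false := by
      cases plan with
      | nil => simp at hsmall
      | cons _ _ => rfl
    rw [hpe, if_neg hsmall]
    simp only [Bool.false_eq_true, if_false]
    by_cases c1 : ∀ x, (pvKeys "on" events).count x ≤ 1
    · rw [(pv_values_any (pvKeys "on" events)).mpr c1, (pv_noDup_iff _).mpr c1]
      simp only [Bool.false_eq_true, if_false, Bool.true_and]
      by_cases c2 : ∀ x, x ∉ g → (pvKeys "on-table" events).count x ≤ 1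
      · rw [(pv_items_any g (pvKeys "on-table" events)).mpr c2]
        have c2' : ∀ x, ((pvKeys "on-table" events).filter (fun k => !(PySem.Set.contains g k))).count x ≤ 1 := by
          intro x
          rw [pv_count_filter]
          by_cases hx : x ∈ g
          · rw [if_pos hx]; omega
          · rw [if_neg hx]; exact c2 x hx
        rw [(pv_noDup_iff _).mpr c2']
        simp
        omega
      · have ht : ((PySem.Dict.counter (pvKeys "on-table" events)).items.any
            fun p => !(PySem.Set.contains g p.1) && decide (1 < p.2)) = true := by
          by_contra hc
          exact c2 ((pv_items_any g (pvKeys "on-table" events)).mp (by simpa using hc))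
        rw [ht]
        have hnd : pvNoDup ((pvKeys "on-table" events).filter (fun k => !(PySem.Set.contains g k))) = false := by
          cases hcv : pvNoDup ((pvKeys "on-table" events).filter (fun k => !(PySem.Set.contains g k)))
          · rfl
          · exfalso
            apply c2
            intro x hx
            have h1 := (pv_noDup_iff _).mp hcv x
            rw [pv_count_filter, if_neg hx] at h1
            exact h1
        rw [hnd]
        simp
    · have ht : ((PySem.Dict.counter (pvKeys "on" events)).values.any fun c => decide (1 < c)) = true := by
        by_contra hc
        exact c1 ((pv_values_any (pvKeys "on" events)).mp (by simpa using hc))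
      rw [ht]
      have hnd : pvNoDup (pvKeys "on" events) = false := by
        cases hcv : pvNoDup (pvKeys "on" events)
        · rfl
        · exact absurd ((pv_noDup_iff _).mp hcv) c1
      rw [hnd]
      simp
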